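-- pv_equiv track=rewrite | github.com/Zafar205/codeforces | p29.py | solve
-- ===== SOURCE A (Python) =====
-- def solve(n, friends_fingers):
--     total_friends_fingers = sum(friends_fingers)
--     count = 0
--
--     for dima_fingers in range(1, 6):
--         total = total_friends_fingers + dima_fingers
--         if total % (n+1) != 1:  # If count doesn't land on Dima
--             count += 1
--
--     return count
-- ===== SOURCE B (Python) =====
-- def solve(n, friends_fingers):
--     # Closed form: Dima loses for choice d in 1..5 iff (S+d) % (n+1) == 1.
--     m = n + 1
--     if m < 2:
--         # residue 1 is never produced by % m when m <= 1, so no choice is bad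
--         return 5
--     r = (1 - sum(friends_fingers)) % m   # bad d are exactly d = r (mod m)
--     if r == 0:
--         bad = 5 // m
--     elif r <= 5:
--         bad = (5 - r) // m + 1
--     else:
--         bad = 0
--     return 5 - bad
-- ===== Notes on version B (the rewrite author's own statement) =====
-- stated objective: alternative
-- what changed: Replaces the loop over Dima's five finger choices by a closed-form residue count: bad choices d in 1..5 are exactly those with d congruent to (1 - sum) mod (n+1), counted arithmetically.
import Mathlib
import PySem

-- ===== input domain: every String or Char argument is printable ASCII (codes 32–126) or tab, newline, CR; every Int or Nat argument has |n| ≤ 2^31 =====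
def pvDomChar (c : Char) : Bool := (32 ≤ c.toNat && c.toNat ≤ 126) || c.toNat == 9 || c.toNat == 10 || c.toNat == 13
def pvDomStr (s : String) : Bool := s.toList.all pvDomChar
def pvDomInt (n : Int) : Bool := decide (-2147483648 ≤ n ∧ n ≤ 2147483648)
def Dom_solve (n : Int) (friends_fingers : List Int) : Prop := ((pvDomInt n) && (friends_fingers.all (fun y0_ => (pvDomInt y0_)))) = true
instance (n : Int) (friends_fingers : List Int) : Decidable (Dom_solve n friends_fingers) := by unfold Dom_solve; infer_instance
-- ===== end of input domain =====

-- B replaces A's loop over Dima's five choices by a closed-form residue count (same result, no loop).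

-- ===== PORT A =====
def solve (n : Int) (friends_fingers : List Int) : Int :=
  let total_friends_fingers := friends_fingers.sum
  (PySem.List.pyRange 1 6 1).foldl
    (fun count dima_fingers =>
      let total := total_friends_fingers + dima_fingers
      if PySem.Int.mod total (n + 1) ≠ 1 then count + 1 else count) 0

-- ===== PORT B =====
def solve_alt (n : Int) (friends_fingers : List Int) : Int :=
  let m := n + 1
  if m < 2 then 5
  else
    let r := PySem.Int.mod (1 - friends_fingers.sum) m
    let bad :=
      if r = 0 then PySem.Int.floordiv 5 m
      else if r ≤ 5 then PySem.Int.floordiv (5 - r) m + 1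
      else 0
    5 - bad

-- ===== PRECONDITION & SPEC =====
-- Pre_ excludes only n = -1, where the Python A raises ZeroDivisionError (total % 0).
def Pre_solve (n : Int) (friends_fingers : List Int) : Prop := n ≠ -1
instance (n : Int) (friends_fingers : List Int) : Decidable (Pre_solve n friends_fingers) := by unfold Pre_solve; infer_instance
def pvWitness_solve : Int × List Int := (3, [1, 2])

def Spec_solve (n : Int) (friends_fingers : List Int) (out : Int) : Prop := out = solve_alt n friends_fingers
instance (n : Int) (friends_fingers : List Int) (out : Int) : Decidable (Spec_solve n friends_fingers out) := by unfold Spec_solve; infer_instance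

-- ===== CLAIM (what is proved, stated in full; the proofs are below) =====
def Claim_equal_solve : Prop := ∀ (n : Int) (friends_fingers : List Int), Dom_solve n friends_fingers → Pre_solve n friends_fingers → Spec_solve n friends_fingers (solve n friends_fingers)

-- ===== LEMMAS AND PROOFS =====

set_option maxHeartbeats 2000000 in
theorem main_count (m S : Int) (hm : 2 ≤ m) :
    List.foldl (fun count d => if PySem.Int.mod (S + d) m ≠ 1 then count + 1 else count) 0 [1,2,3,4,5]
    = 5 - (if PySem.Int.mod (1 - S) m = 0 then PySem.Int.floordiv 5 m
           else if PySem.Int.mod (1 - S) m ≤ 5 then PySem.Int.floordiv (5 - PySem.Int.mod (1 - S) m) m + 1 else 0) := by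
  have hpos : (0:Int) < m := by omega
  simp only [List.foldl]
  by_cases h6 : m ≤ 5
  · simp only [PySem.Int.mod_eq_emod_of_pos hpos, PySem.Int.floordiv_eq_ediv_of_pos hpos]
    interval_cases m <;> split_ifs <;> omega
  · set r := PySem.Int.mod (1 - S) m with hrdef
    have hre : r = (1 - S) % m := PySem.Int.mod_eq_emod_of_pos hpos
    have hr0 : 0 ≤ r := PySem.Int.mod_nonneg _ hpos
    have hrm : r < m := PySem.Int.mod_lt _ hpos
    obtain ⟨q, hq⟩ : ∃ q, 1 - S = m * q + r := by
      refine ⟨(1 - S) / m, ?_⟩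
      have := Int.mul_ediv_add_emod (1 - S) m
      rw [hre]; omega
    have h1m : (1:Int) % m = 1 := Int.emod_eq_of_lt (by norm_num) (by omega)
    have key : ∀ d : Int, 1 ≤ d → d ≤ 5 → ((PySem.Int.mod (S + d) m = 1) ↔ r = d) := by
      intro d h1 h5
      rw [PySem.Int.mod_eq_emod_of_pos hpos]
      constructor
      · intro h
        have h' : (S + d) % m = 1 % m := by rw [h, h1m]
        have hd : m ∣ (S + d - 1) :=
          (PySem.Int.emod_eq_zero_iff_dvd _ _).mp (Int.emod_eq_emod_iff_emod_sub_eq_zero.mp h')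
        have hdr : m ∣ (d - r) := by
          have he : d - r = (S + d - 1) + m * q := by linarith
          rw [he]; exact dvd_add hd ⟨q, rfl⟩
        have := Int.eq_zero_of_abs_lt_dvd hdr (abs_lt.mpr ⟨by omega, by omega⟩)
        omega
      · intro h
        have hd : m ∣ (S + d - 1) := by
          have he : S + d - 1 = (d - r) - m * q := by linarith
          rw [he]; exact dvd_sub (by rw [h]; simp) ⟨q, rfl⟩
        have h' := Int.emod_eq_emod_iff_emod_sub_eq_zero.mpr ((PySem.Int.emod_eq_zero_iff_dvd _ _).mpr hd)
        rwa [h1m] at h'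
    have hc1 := key 1 (by norm_num) (by norm_num)
    have hc2 := key 2 (by norm_num) (by norm_num)
    have hc3 := key 3 (by norm_num) (by norm_num)
    have hc4 := key 4 (by norm_num) (by norm_num)
    have hc5 := key 5 (by norm_num) (by norm_num)
    have hf5 : PySem.Int.floordiv 5 m = 0 :=
      (PySem.Int.floordiv_eq_iff_of_pos hpos).mpr ⟨by omega, by omega⟩
    have hfr : r ≤ 5 → PySem.Int.floordiv (5 - r) m = 0 := fun h =>
      (PySem.Int.floordiv_eq_iff_of_pos hpos).mpr ⟨by omega, by omega⟩
    have hbad : (if r = 0 then PySem.Int.floordiv 5 m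
           else if r ≤ 5 then PySem.Int.floordiv (5 - r) m + 1 else 0)
        = (if 1 ≤ r ∧ r ≤ 5 then 1 else 0) := by
      split_ifs with h1 h2 h3
      all_goals first
        | (rw [hf5]; omega)
        | (rw [hfr (by omega)]; omega)
        | omega
    rw [hbad]
    simp only [ne_eq, hc1, hc2, hc3, hc4, hc5]
    split_ifs <;> omega


-- ===== VERDICT =====
theorem solve_spec : Claim_equal_solve := by
  intro n fs _ hpre
  have hne : n + 1 ≠ 0 := by
    intro h; exact hpre (by omega)
  unfold Spec_solve solve solve_alt
  rw [show PySem.List.pyRange 1 6 1 = [1,2,3,4,5] from by decide]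
  simp only []
  set S := fs.sum with hS
  by_cases h2 : n + 1 < 2
  · rw [if_pos h2]
    have hc : ∀ d : Int, ¬ PySem.Int.mod (S + d) (n + 1) = 1 := by
      intro d
      rcases lt_or_gt_of_ne hne with hneg | hpos
      · have := PySem.Int.mod_neg_bounds (S + d) hneg; omega
      · have h1 : n + 1 = 1 := by omega
        have := PySem.Int.mod_nonneg (S + d) hpos
        have := PySem.Int.mod_lt (S + d) hpos
        omega
    simp [List.foldl, hc]
  · rw [if_neg h2]
    exact main_count (n + 1) S (by omega)
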